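-- pv_equiv track=rewrite | github.com/TheTomcat/AdventOfCode | adventofcode/solutions/2020/10/problem10.py | build_trees
-- ===== SOURCE A (Python) =====
-- def build_trees(data):
--     forward = {}
--     for node in data:
--         forward[node] = []
--         for i in range(node+1, node+4):
--             if i in data:
--                 forward[node].append(i)
--     backward = {}
--     for node in reversed(data):
--         backward[node] = []
--         for i in range(node-3,node):
--             if i in data:
--                 backward[node].append(i)
--     return forward, backward
-- ===== SOURCE B (Python) =====
-- def build_trees(data):
--     forward = {}
--     for node in data:
--         forward[node] = [i for i in range(node + 1, node + 4) if i in data]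
--     backward = {node: [] for node in reversed(data)}
--     for src in sorted(forward):
--         for dst in forward[src]:
--             backward[dst].append(src)
--     return forward, backward
-- ===== Notes on version B (the rewrite author's own statement) =====
-- stated objective: alternative
-- what changed: B builds the backward adjacency by inverting the edges of forward (pre-initialising every node's list, then appending each source to its destinations in sorted source order) instead of re-scanning range(node-3,node) for every node.
import Mathlib
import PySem

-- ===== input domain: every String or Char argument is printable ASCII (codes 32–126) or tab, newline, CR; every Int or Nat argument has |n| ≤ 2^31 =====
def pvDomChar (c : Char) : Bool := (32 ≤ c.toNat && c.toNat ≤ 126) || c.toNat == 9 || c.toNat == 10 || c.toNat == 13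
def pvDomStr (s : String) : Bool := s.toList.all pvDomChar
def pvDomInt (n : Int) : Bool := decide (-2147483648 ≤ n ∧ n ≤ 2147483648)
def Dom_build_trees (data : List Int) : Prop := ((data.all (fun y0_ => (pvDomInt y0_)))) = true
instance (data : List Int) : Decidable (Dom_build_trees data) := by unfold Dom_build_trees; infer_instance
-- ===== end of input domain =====

-- B builds the backward adjacency by inverting forward's edges (pre-initialised empty lists,
-- sources visited in sorted order) instead of re-scanning range(node-3,node) per node; objective: alternative decomposition.

-- ===== PORT A =====
def build_trees (data : List Int) : (List (Int × List Int)) × (List (Int × List Int)) :=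
  let forward : PySem.Dict Int (List Int) := data.foldl (fun d node =>
    (PySem.List.pyRange (node + 1) (node + 4)).foldl
      (fun d i => if i ∈ data then d.modify node [] (fun l => l ++ [i]) else d)
      (d.insert node ([] : List Int))) PySem.Dict.empty
  let backward : PySem.Dict Int (List Int) := data.reverse.foldl (fun d node =>
    (PySem.List.pyRange (node - 3) node).foldl
      (fun d i => if i ∈ data then d.modify node [] (fun l => l ++ [i]) else d)
      (d.insert node ([] : List Int))) PySem.Dict.empty
  (forward.items, backward.items)

-- ===== PORT B =====
def build_trees_alt (data : List Int) : (List (Int × List Int)) × (List (Int × List Int)) :=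
  let forward : PySem.Dict Int (List Int) := data.foldl (fun d node =>
    d.insert node ((PySem.List.pyRange (node + 1) (node + 4)).filter (fun i => decide (i ∈ data))))
    PySem.Dict.empty
  let backward0 : PySem.Dict Int (List Int) :=
    data.reverse.foldl (fun d node => d.insert node ([] : List Int)) PySem.Dict.empty
  let backward : PySem.Dict Int (List Int) :=
    (PySem.List.sorted forward.keys (fun x => x)).foldl
      (fun d src => (forward.getD src []).foldl
        (fun d dst => d.modify dst [] (fun l => l ++ [src])) d)
      backward0
  (forward.items, backward.items)

-- ===== PRECONDITION & SPEC =====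
def Spec_build_trees (data : List Int) (out : (List (Int × List Int)) × (List (Int × List Int))) : Prop := out = build_trees_alt data
instance (data : List Int) (out : (List (Int × List Int)) × (List (Int × List Int))) : Decidable (Spec_build_trees data out) := by unfold Spec_build_trees; infer_instance

-- ===== CLAIM (what is proved, stated in full; the proofs are below) =====
def Claim_equal_build_trees : Prop := ∀ (data : List Int), Dom_build_trees data → Spec_build_trees data (build_trees data)

-- ===== LEMMAS AND PROOFS =====

-- the 3-element windows Python's range produces
lemma pyRange_up3 (s : Int) : PySem.List.pyRange (s + 1) (s + 4) = [s + 1, s + 2, s + 3] := by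
  rw [PySem.List.pyRange_one_cons (by omega), PySem.List.pyRange_one_cons (by omega),
      PySem.List.pyRange_one_cons (by omega), PySem.List.pyRange_one_eq_nil (by omega)]
  norm_num
  omega

lemma pyRange_down3 (c : Int) : PySem.List.pyRange (c - 3) c = [c - 3, c - 2, c - 1] := by
  rw [PySem.List.pyRange_one_cons (by omega), PySem.List.pyRange_one_cons (by omega),
      PySem.List.pyRange_one_cons (by omega), PySem.List.pyRange_one_eq_nil (by omega)]
  norm_num
  omega

-- A's inner append loop, all at one key, is a single insert of the filtered window
lemma inner_loop_eq_insert (data : List Int) (l : List Int) (d : PySem.Dict Int (List Int))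
    (k : Int) (v : List Int) :
    l.foldl (fun d i => if i ∈ data then d.modify k [] (fun a => a ++ [i]) else d) (d.insert k v)
      = d.insert k (v ++ l.filter (fun i => decide (i ∈ data))) := by
  induction l generalizing v with
  | nil => simp
  | cons i t ih =>
      simp only [List.foldl_cons]
      by_cases hi : i ∈ data
      · rw [if_pos hi]
        have hstep : (d.insert k v).modify k [] (fun a => a ++ [i]) = d.insert k (v ++ [i]) := by
          simp [PySem.Dict.modify, PySem.Dict.getD_insert_self, PySem.Dict.insert_insert_self]
        rw [hstep, ih]
        simp [hi]
      · rw [if_neg hi, ih]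
        simp [hi]

-- getD of a fold of key-determined inserts
lemma getD_foldl_insert_fun (l : List Int) (f : Int → List Int) (d : PySem.Dict Int (List Int))
    (c : Int) :
    (l.foldl (fun d n => d.insert n (f n)) d).getD c [] = if c ∈ l then f c else d.getD c [] := by
  induction l generalizing d with
  | nil => simp
  | cons n t ih =>
      simp only [List.foldl_cons, ih, PySem.Dict.getD_insert, List.mem_cons]
      by_cases h1 : c ∈ t <;> by_cases h2 : c = n <;> simp [h1, h2]

-- a nested fold over (source, its destinations) is a fold over the flattened edge list
lemma nested_foldl_eq_flatMap (l : List Int) (g : Int → List Int) (d : PySem.Dict Int (List Int)) :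
    l.foldl (fun d src => (g src).foldl
        (fun d dst => d.modify dst [] (fun l2 => l2 ++ [src])) d) d
      = (l.flatMap (fun s => (g s).map (fun t => (t, s)))).foldl
        (fun d p => d.modify p.1 [] (fun l2 => l2 ++ [p.2])) d := by
  induction l generalizing d with
  | nil => rfl
  | cons s t ih => simp [List.foldl_append, List.foldl_map, ih]

-- updating a set with elements it already holds changes nothing
lemma set_update_id (l s : List Int) (h : ∀ x ∈ l, x ∈ s) : PySem.Set.update s l = s := by
  induction l generalizing s with
  | nil => rfl
  | cons x t ih =>
      have hx : PySem.Set.add s x = s := by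
        simp [PySem.Set.add, PySem.Set.contains, h x (by simp)]
      simp only [PySem.Set.update, List.foldl_cons]
      rw [show List.foldl PySem.Set.add (PySem.Set.add s x) t = PySem.Set.update (PySem.Set.add s x) t from rfl,
          hx, ih _ (fun y hy => h y (by simp [hy]))]

-- two strictly increasing integer lists with the same members are equal
lemma eq_of_pairwise_lt_of_mem_iff (l₁ l₂ : List Int)
    (h₁ : l₁.Pairwise (· < ·)) (h₂ : l₂.Pairwise (· < ·))
    (hm : ∀ x, x ∈ l₁ ↔ x ∈ l₂) : l₁ = l₂ := by
  have hn₁ : l₁.Nodup := h₁.imp (fun h => ne_of_lt h)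
  have hn₂ : l₂.Nodup := h₂.imp (fun h => ne_of_lt h)
  have hp : l₁.Perm l₂ := (List.perm_ext_iff_of_nodup hn₁ hn₂).2 hm
  exact List.Perm.eq_of_pairwise (fun a b _ _ hab hba => absurd hba (not_lt.2 (le_of_lt hab)).elim) h₁ h₂ hp

-- the contribution of one source s to the backward list of c
lemma contrib (data : List Int) (c s : Int) :
    ((([s + 1, s + 2, s + 3].filter (fun i => decide (i ∈ data))).map (fun t => (t, s))).filter
        (fun p => p.1 == c)).map (fun p => p.2)
      = if c ∈ data ∧ c - 3 ≤ s ∧ s ≤ c - 1 then [s] else [] := by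
  rw [List.filter_map, List.map_map, List.filter_filter]
  by_cases h1 : s + 1 = c <;> by_cases h2 : s + 2 = c <;> by_cases h3 : s + 3 = c <;>
    by_cases hc : c ∈ data <;>
    simp [h1, h2, h3, hc, Function.comp] <;> omega

-- flatMap of an if-singleton is a filter
lemma flatMap_if_singleton (l : List Int) (q : Int → Prop) [DecidablePred q] :
    l.flatMap (fun s => if q s then [s] else []) = l.filter (fun s => decide (q s)) := by
  induction l with
  | nil => rfl
  | cons x t ih => by_cases h : q x <;> simp [h, ih]

-- abbreviations used by the main proof (proof-side only)
def fwdF (data : List Int) (n : Int) : List Int :=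
  (PySem.List.pyRange (n + 1) (n + 4)).filter (fun i => decide (i ∈ data))

def bwdF (data : List Int) (n : Int) : List Int :=
  (PySem.List.pyRange (n - 3) n).filter (fun i => decide (i ∈ data))

def Fdict (data : List Int) : PySem.Dict Int (List Int) :=
  data.foldl (fun d node => d.insert node (fwdF data node)) PySem.Dict.empty

lemma Fdict_keys (data : List Int) : (Fdict data).keys = PySem.Set.ofList data := by
  unfold Fdict
  rw [PySem.Dict.keys_foldl_insert data (fun _ node => fwdF data node) PySem.Dict.empty,
      PySem.Dict.keys_empty, PySem.Set.ofList_eq_foldl]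
  rfl

lemma Fdict_getD (data : List Int) (s : Int) :
    (Fdict data).getD s [] = if s ∈ data then fwdF data s else [] := by
  unfold Fdict
  rw [getD_foldl_insert_fun data (fwdF data) PySem.Dict.empty s, PySem.Dict.getD_empty]

-- the sorted distinct sources
def srcsL (data : List Int) : List Int := PySem.List.sorted (Fdict data).keys (fun x => x)

lemma srcs_mem_iff (data : List Int) (s : Int) : s ∈ srcsL data ↔ s ∈ data := by
  unfold srcsL
  rw [(PySem.List.sorted_perm (Fdict data).keys (fun x => x) false).mem_iff, Fdict_keys,
      PySem.Set.mem_ofList]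

lemma srcs_pairwise_lt (data : List Int) : (srcsL data).Pairwise (· < ·) := by
  have hnd : (srcsL data).Nodup := by
    unfold srcsL
    exact (PySem.List.sorted_perm (Fdict data).keys (fun x => x) false).nodup_iff.2
      (Fdict_keys data ▸ PySem.Set.nodup_ofList data)
  have hle : (srcsL data).Pairwise (· ≤ ·) :=
    PySem.List.sorted_pairwise (Fdict data).keys (fun x => x)
  exact (hle.and hnd).imp (fun h => lt_of_le_of_ne h.1 h.2)

-- the backward list of c, read off the inverted edge list
lemma edges_filter_eq (data : List Int) (c : Int) (hc : c ∈ data) :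
    (((srcsL data).flatMap (fun s => ((Fdict data).getD s []).map (fun t => (t, s)))).filter
        (fun p => p.1 == c)).map (fun p => p.2) = bwdF data c := by
  rw [List.filter_flatMap, List.map_flatMap]
  have h1 : ∀ s ∈ srcsL data,
      ((((Fdict data).getD s []).map (fun t => (t, s))).filter (fun p => p.1 == c)).map
          (fun p => p.2)
        = if c - 3 ≤ s ∧ s ≤ c - 1 then [s] else [] := by
    intro s hs
    rw [Fdict_getD, if_pos ((srcs_mem_iff data s).1 hs)]
    rw [show fwdF data s = [s + 1, s + 2, s + 3].filter (fun i => decide (i ∈ data)) by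
          unfold fwdF; rw [pyRange_up3]]
    rw [contrib data c s]
    simp [hc]
  rw [List.flatMap_congr h1, flatMap_if_singleton (srcsL data) (fun s => c - 3 ≤ s ∧ s ≤ c - 1)]
  unfold bwdF
  rw [pyRange_down3]
  apply eq_of_pairwise_lt_of_mem_iff
  · exact (srcs_pairwise_lt data).filter _
  · refine List.Pairwise.filter _ ?_
    simp [List.pairwise_cons]
  · intro x
    simp only [List.mem_filter, srcs_mem_iff, decide_eq_true_eq, List.mem_cons,
      List.not_mem_nil, or_false]
    constructor
    · rintro ⟨hxd, h⟩
      exact ⟨by omega, hxd⟩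
    · rintro ⟨h, hxd⟩
      exact ⟨hxd, by omega⟩

lemma main_eq (data : List Int) : build_trees data = build_trees_alt data := by
  unfold build_trees build_trees_alt
  have hfunF : (fun (d : PySem.Dict Int (List Int)) (node : Int) =>
      (PySem.List.pyRange (node + 1) (node + 4)).foldl
        (fun d i => if i ∈ data then d.modify node [] (fun l => l ++ [i]) else d)
        (d.insert node ([] : List Int)))
      = fun d node => d.insert node (fwdF data node) := by
    funext d node
    rw [inner_loop_eq_insert data _ d node []]
    rfl
  have hfunB : (fun (d : PySem.Dict Int (List Int)) (node : Int) =>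
      (PySem.List.pyRange (node - 3) node).foldl
        (fun d i => if i ∈ data then d.modify node [] (fun l => l ++ [i]) else d)
        (d.insert node ([] : List Int)))
      = fun d node => d.insert node (bwdF data node) := by
    funext d node
    rw [inner_loop_eq_insert data _ d node []]
    rfl
  simp only [hfunF, hfunB]
  refine congrArg₂ Prod.mk rfl ?_
  -- both backward dicts have the same (nodup) keys and the same values at every key
  have hAkeys : (data.reverse.foldl (fun d node => d.insert node (bwdF data node))
      PySem.Dict.empty).keys = PySem.Set.ofList data.reverse := by
    rw [PySem.Dict.keys_foldl_insert data.reverse (fun _ node => bwdF data node) PySem.Dict.empty,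
        PySem.Dict.keys_empty, PySem.Set.ofList_eq_foldl]
    rfl
  have hB0keys : (data.reverse.foldl (fun d node => d.insert node ([] : List Int))
      PySem.Dict.empty).keys = PySem.Set.ofList data.reverse := by
    rw [PySem.Dict.keys_foldl_insert data.reverse (fun _ _ => ([] : List Int)) PySem.Dict.empty,
        PySem.Dict.keys_empty, PySem.Set.ofList_eq_foldl]
    rfl
  rw [show (data.foldl (fun d node => d.insert node
        ((PySem.List.pyRange (node + 1) (node + 4)).filter (fun i => decide (i ∈ data))))
        PySem.Dict.empty) = Fdict data from rfl]
  rw [nested_foldl_eq_flatMap (PySem.List.sorted (Fdict data).keys (fun x => x))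
        (fun s => (Fdict data).getD s [])]
  rw [show PySem.List.sorted (Fdict data).keys (fun x => x) = srcsL data from rfl]
  have hedge_keys : ∀ x ∈ ((srcsL data).flatMap
      (fun s => ((Fdict data).getD s []).map (fun t => (t, s)))).map (fun p => p.1),
      x ∈ PySem.Set.ofList data.reverse := by
    intro x hx
    rw [PySem.Set.mem_ofList, List.mem_reverse]
    simp only [List.mem_map, List.mem_flatMap] at hx
    obtain ⟨p, ⟨s, hs, t, ht, hts⟩, hpx⟩ := hx
    rw [Fdict_getD, if_pos ((srcs_mem_iff data s).1 hs)] at ht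
    unfold fwdF at ht
    have hmem : t ∈ data := by simpa using List.of_mem_filter ht
    have hxt : x = t := by rw [← hpx, ← hts]
    rwa [hxt]
  have hBkeys : (((srcsL data).flatMap
        (fun s => ((Fdict data).getD s []).map (fun t => (t, s)))).foldl
        (fun d p => d.modify p.1 [] (fun l => l ++ [p.2]))
        (data.reverse.foldl (fun d node => d.insert node ([] : List Int)) PySem.Dict.empty)).keys
      = PySem.Set.ofList data.reverse := by
    rw [PySem.Dict.keys_foldl_modify_key, hB0keys, set_update_id _ _ hedge_keys]
  rw [PySem.Dict.items_eq_map_keys _ (hAkeys ▸ PySem.Set.nodup_ofList data.reverse) [],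
      PySem.Dict.items_eq_map_keys _ (hBkeys ▸ PySem.Set.nodup_ofList data.reverse) [],
      hAkeys, hBkeys]
  apply List.map_congr_left
  intro c hcmem
  have hc : c ∈ data := List.mem_reverse.1 ((PySem.Set.mem_ofList data.reverse c).1 hcmem)
  refine congrArg (Prod.mk c) ?_
  rw [getD_foldl_insert_fun data.reverse (bwdF data) PySem.Dict.empty c,
      if_pos (List.mem_reverse.2 hc)]
  rw [PySem.Dict.getD_foldl_modify_append, getD_foldl_insert_fun data.reverse (fun _ => [])
      PySem.Dict.empty c, edges_filter_eq data c hc]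
  simp

-- ===== VERDICT (by name: the statement is the Claim_ definition above) =====
theorem build_trees_spec : Claim_equal_build_trees := by
  intro data _
  exact main_eq data
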